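-- pv_equiv track=rewrite | github.com/jackgopack4/jackgopack4 | rankedchoice.py | findMinAndMaxVoterLists
-- ===== SOURCE A (Python) =====
-- from typing import Optional, List
--
-- def findMinAndMaxVoterLists(
--     vote_counts: dict, cur_num_votes: int
-- ) -> (List[int], List[int], int, int):
--     max_vote_ids = []
--     max_vote_number = -1
--     min_vote_ids = []
--     min_vote_number = cur_num_votes + 1
--     for candidate_id, voter_ids in vote_counts.items():  # O(M)
--         num_votes = len(voter_ids)
--         if num_votes > max_vote_number:
--             max_vote_ids = [candidate_id]
--             max_vote_number = num_votes
--         elif num_votes == max_vote_number: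
--             max_vote_ids.append(candidate_id)
--         if num_votes < min_vote_number:
--             min_vote_ids = [candidate_id]
--             min_vote_number = num_votes
--         elif num_votes == min_vote_number:
--             min_vote_ids.append(candidate_id)
--     return min_vote_ids, max_vote_ids, min_vote_number, max_vote_number
-- ===== SOURCE B (Python) =====
-- from typing import List
--
-- def findMinAndMaxVoterLists(
--     vote_counts: dict, cur_num_votes: int
-- ) -> (List[int], List[int], int, int):
--     counts = [(cid, len(vids)) for cid, vids in vote_counts.items()]
--     min_vote_number = min([cur_num_votes + 1] + [c for _, c in counts])
--     max_vote_number = max([-1] + [c for _, c in counts])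
--     min_vote_ids = [cid for cid, c in counts if c == min_vote_number]
--     max_vote_ids = [cid for cid, c in counts if c == max_vote_number]
--     return min_vote_ids, max_vote_ids, min_vote_number, max_vote_number
-- ===== Notes on version B (the rewrite author's own statement) =====
-- stated objective: simpler
-- what changed: Replaced A's single-pass four-accumulator loop with restart/append list logic by computing min/max vote numbers with min()/max() over the counts (seeded with A's initial values) and then collecting the id lists with comprehensions filtering on those extremes.
import Mathlib
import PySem

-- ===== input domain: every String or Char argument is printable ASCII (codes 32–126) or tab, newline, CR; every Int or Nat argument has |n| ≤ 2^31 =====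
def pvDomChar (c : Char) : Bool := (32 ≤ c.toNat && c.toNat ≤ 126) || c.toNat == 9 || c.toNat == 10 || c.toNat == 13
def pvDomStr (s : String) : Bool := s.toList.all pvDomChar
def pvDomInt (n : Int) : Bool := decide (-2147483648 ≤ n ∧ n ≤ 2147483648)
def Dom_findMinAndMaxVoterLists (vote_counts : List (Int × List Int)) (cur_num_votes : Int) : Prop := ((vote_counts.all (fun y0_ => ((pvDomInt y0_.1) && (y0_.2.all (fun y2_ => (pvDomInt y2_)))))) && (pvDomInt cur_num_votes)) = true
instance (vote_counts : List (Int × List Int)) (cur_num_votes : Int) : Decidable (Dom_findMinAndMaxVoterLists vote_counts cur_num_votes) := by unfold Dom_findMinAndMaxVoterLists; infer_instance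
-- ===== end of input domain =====

-- B replaces A's four-accumulator loop by min/max over the counts plus filtering comprehensions (simpler decomposition, same cost).

-- ===== PORT A =====
-- one loop iteration of A: update (max_ids, max_n, min_ids, min_n) for entry p
def pvStepA (st : List Int × Int × List Int × Int) (p : Int × List Int) :
    List Int × Int × List Int × Int :=
  let num_votes : Int := p.2.length
  let mx : List Int × Int :=
    if num_votes > st.2.1 then ([p.1], num_votes)
    else if num_votes = st.2.1 then (st.1 ++ [p.1], st.2.1)
    else (st.1, st.2.1)
  let mn : List Int × Int :=
    if num_votes < st.2.2.2 then ([p.1], num_votes)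
    else if num_votes = st.2.2.2 then (st.2.2.1 ++ [p.1], st.2.2.2)
    else (st.2.2.1, st.2.2.2)
  (mx.1, mx.2, mn.1, mn.2)

def findMinAndMaxVoterLists (vote_counts : List (Int × List Int)) (cur_num_votes : Int) : List Int × List Int × Int × Int :=
  let st := vote_counts.foldl pvStepA ([], -1, [], cur_num_votes + 1)
  (st.2.2.1, st.1, st.2.2.2, st.2.1)

-- ===== PORT B =====
def findMinAndMaxVoterLists_alt (vote_counts : List (Int × List Int)) (cur_num_votes : Int) : List Int × List Int × Int × Int :=
  let counts : List (Int × Int) := vote_counts.map (fun p => (p.1, (p.2.length : Int)))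
  let min_vote_number : Int := (counts.map Prod.snd).foldl min (cur_num_votes + 1)
  let max_vote_number : Int := (counts.map Prod.snd).foldl max (-1)
  ((counts.filter (fun p => p.2 = min_vote_number)).map Prod.fst,
   (counts.filter (fun p => p.2 = max_vote_number)).map Prod.fst,
   min_vote_number, max_vote_number)

-- ===== PRECONDITION & SPEC =====
def Spec_findMinAndMaxVoterLists (vote_counts : List (Int × List Int)) (cur_num_votes : Int) (out : List Int × List Int × Int × Int) : Prop := out = findMinAndMaxVoterLists_alt vote_counts cur_num_votes
instance (vote_counts : List (Int × List Int)) (cur_num_votes : Int) (out : List Int × List Int × Int × Int) : Decidable (Spec_findMinAndMaxVoterLists vote_counts cur_num_votes out) := by unfold Spec_findMinAndMaxVoterLists; infer_instance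

-- ===== CLAIM (what is proved, stated in full; the proofs are below) =====
def Claim_equal_findMinAndMaxVoterLists : Prop := ∀ (vote_counts : List (Int × List Int)) (cur_num_votes : Int), Dom_findMinAndMaxVoterLists vote_counts cur_num_votes → Spec_findMinAndMaxVoterLists vote_counts cur_num_votes (findMinAndMaxVoterLists vote_counts cur_num_votes)

-- ===== LEMMAS AND PROOFS =====

-- the max-half and min-half of A's loop state evolve independently
def pvStepMax (st : List Int × Int) (p : Int × List Int) : List Int × Int :=
  if (p.2.length : Int) > st.2 then ([p.1], (p.2.length : Int))
  else if (p.2.length : Int) = st.2 then (st.1 ++ [p.1], st.2) else st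

def pvStepMin (st : List Int × Int) (p : Int × List Int) : List Int × Int :=
  if (p.2.length : Int) < st.2 then ([p.1], (p.2.length : Int))
  else if (p.2.length : Int) = st.2 then (st.1 ++ [p.1], st.2) else st

lemma foldA_split (l : List (Int × List Int)) (a c : List Int) (b d : Int) :
    l.foldl pvStepA (a, b, c, d) =
      ((l.foldl pvStepMax (a, b)).1, (l.foldl pvStepMax (a, b)).2,
       (l.foldl pvStepMin (c, d)).1, (l.foldl pvStepMin (c, d)).2) := by
  induction l generalizing a b c d with
  | nil => rfl
  | cons hd tl ih =>
    simp only [List.foldl_cons]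
    rw [show pvStepA (a, b, c, d) hd
          = ((pvStepMax (a, b) hd).1, (pvStepMax (a, b) hd).2,
             (pvStepMin (c, d) hd).1, (pvStepMin (c, d) hd).2) by
        simp only [pvStepA, pvStepMax, pvStepMin]]
    rw [ih]

lemma foldl_max_le (xs : List Int) (a : Int) : a ≤ xs.foldl max a := by
  induction xs generalizing a with
  | nil => simp
  | cons x xs ihx => exact le_trans (le_max_left a x) (ihx (max a x))

lemma foldl_min_le (xs : List Int) (a : Int) : xs.foldl min a ≤ a := by
  induction xs generalizing a with
  | nil => simp
  | cons x xs ihx => exact le_trans (ihx (min a x)) (min_le_left a x)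

lemma foldMax_char (l : List (Int × List Int)) (ids : List Int) (n : Int) :
    l.foldl pvStepMax (ids, n) =
      (let M := (l.map (fun p => ((p.2.length : Int)))).foldl max n
       ((if M = n then ids else []) ++
          (l.filter (fun p => ((p.2.length : Int)) = M)).map Prod.fst, M)) := by
  induction l generalizing ids n with
  | nil => simp
  | cons hd tl ih =>
    simp only [List.foldl_cons, List.map_cons, List.filter_cons]
    set k : Int := (hd.2.length : Int) with hk
    rcases lt_trichotomy n k with hgt | heq | hlt
    · rw [show pvStepMax (ids, n) hd = ([hd.1], k) by
          simp only [pvStepMax, ← hk]; rw [if_pos hgt]]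
      rw [ih]
      have hmax : max n k = k := by omega
      simp only [← hk, hmax]
      set M := (tl.map (fun p => ((p.2.length : Int)))).foldl max k with hM
      have hkM : k ≤ M := foldl_max_le _ _
      have h1 : ¬ M = n := by omega
      rw [if_neg h1]
      by_cases hkeq : k = M
      · simp [hkeq]
      · simp [hkeq]; omega
    · rw [show pvStepMax (ids, n) hd = (ids ++ [hd.1], n) by
          simp only [pvStepMax, ← hk]; rw [if_neg (by omega), if_pos heq.symm]]
      rw [ih]
      have hmax : max n k = n := by omega
      simp only [← hk, hmax]
      set M := (tl.map (fun p => ((p.2.length : Int)))).foldl max n with hM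
      have hnM : n ≤ M := foldl_max_le _ _
      by_cases hMeq : M = n
      · have hc : k = n := by omega
        simp [hMeq, hc]
      · have hc : ¬ k = M := by omega
        simp [hMeq, hc]
    · rw [show pvStepMax (ids, n) hd = (ids, n) by
          simp only [pvStepMax, ← hk]; rw [if_neg (by omega), if_neg (by omega)]]
      rw [ih]
      have hmax : max n k = n := by omega
      simp only [← hk, hmax]
      set M := (tl.map (fun p => ((p.2.length : Int)))).foldl max n with hM
      have hnM : n ≤ M := foldl_max_le _ _
      by_cases hMeq : M = n
      · have hc : ¬ k = n := by omega
        simp [hMeq, hc]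
      · have hc : ¬ k = M := by omega
        simp [hMeq, hc]

lemma foldMin_char (l : List (Int × List Int)) (ids : List Int) (n : Int) :
    l.foldl pvStepMin (ids, n) =
      (let m := (l.map (fun p => ((p.2.length : Int)))).foldl min n
       ((if m = n then ids else []) ++
          (l.filter (fun p => ((p.2.length : Int)) = m)).map Prod.fst, m)) := by
  induction l generalizing ids n with
  | nil => simp
  | cons hd tl ih =>
    simp only [List.foldl_cons, List.map_cons, List.filter_cons]
    set k : Int := (hd.2.length : Int) with hk
    rcases lt_trichotomy k n with hlt | heq | hgt
    · rw [show pvStepMin (ids, n) hd = ([hd.1], k) by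
          simp only [pvStepMin, ← hk]; rw [if_pos hlt]]
      rw [ih]
      have hmin : min n k = k := by omega
      simp only [← hk, hmin]
      set m := (tl.map (fun p => ((p.2.length : Int)))).foldl min k with hm
      have hmk : m ≤ k := foldl_min_le _ _
      have h1 : ¬ m = n := by omega
      rw [if_neg h1]
      by_cases hkeq : k = m
      · simp [hkeq]
      · simp [hkeq]; omega
    · rw [show pvStepMin (ids, n) hd = (ids ++ [hd.1], n) by
          simp only [pvStepMin, ← hk]; rw [if_neg (by omega), if_pos heq]]
      rw [ih]
      have hmin : min n k = n := by omega
      simp only [← hk, hmin]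
      set m := (tl.map (fun p => ((p.2.length : Int)))).foldl min n with hm
      have hmn : m ≤ n := foldl_min_le _ _
      by_cases hmeq : m = n
      · have hc : k = n := by omega
        simp [hmeq, hc]
      · have hc : ¬ k = m := by omega
        simp [hmeq, hc]
    · rw [show pvStepMin (ids, n) hd = (ids, n) by
          simp only [pvStepMin, ← hk]; rw [if_neg (by omega), if_neg (by omega)]]
      rw [ih]
      have hmin : min n k = n := by omega
      simp only [← hk, hmin]
      set m := (tl.map (fun p => ((p.2.length : Int)))).foldl min n with hm
      have hmn : m ≤ n := foldl_min_le _ _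
      by_cases hmeq : m = n
      · have hc : ¬ k = n := by omega
        simp [hmeq, hc]
      · have hc : ¬ k = m := by omega
        simp [hmeq, hc]

-- ===== VERDICT (by name: the statement is the Claim_ definition above) =====
theorem findMinAndMaxVoterLists_spec : Claim_equal_findMinAndMaxVoterLists := by
  intro vc cv _
  show _ = _
  unfold findMinAndMaxVoterLists findMinAndMaxVoterLists_alt
  rw [foldA_split, foldMax_char, foldMin_char]
  simp [List.map_map, List.filter_map, Function.comp_def]
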